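-- pv_equiv track=rewrite | github.com/swval22/programacion-2 | AC factorial de segundo prim entre dos fibonaccis.py | ranfib
-- ===== SOURCE A (Python) =====
-- def fibonacci(dato):
--     a=0
--     b=1
--     t=0
--     if  dato==1:
--         return True
--     while t < dato:
--         t=a+b
--         a=b
--         b=t
--     if t==dato:
--         return True
--     else:
--         return False
--
-- def ranfib(list):
--     c=0
--     for i in list:
--         if fibonacci(i):
--             c+=1
--             if c==2:
--                 fib1=i
--             elif c == 3:
--                 fib2=i
--     return fib1,fib2
-- ===== SOURCE B (Python) =====
-- def ranfib(list):
--     m = max(list, default=0)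
--     fibs = {0, 1}
--     a, b = 1, 2
--     while a <= m:
--         fibs.add(a)
--         a, b = b, a + b
--     sel = [x for x in list if x in fibs]
--     return sel[1], sel[2]
-- ===== Notes on version B (the rewrite author's own statement) =====
-- stated objective: alternative
-- what changed: B precomputes the set of all Fibonacci numbers up to max(list) once instead of regenerating the Fibonacci sequence for every element, and picks the 2nd/3rd Fibonacci elements by filtering and indexing instead of A's counter-and-assignment loop.
import Mathlib
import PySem

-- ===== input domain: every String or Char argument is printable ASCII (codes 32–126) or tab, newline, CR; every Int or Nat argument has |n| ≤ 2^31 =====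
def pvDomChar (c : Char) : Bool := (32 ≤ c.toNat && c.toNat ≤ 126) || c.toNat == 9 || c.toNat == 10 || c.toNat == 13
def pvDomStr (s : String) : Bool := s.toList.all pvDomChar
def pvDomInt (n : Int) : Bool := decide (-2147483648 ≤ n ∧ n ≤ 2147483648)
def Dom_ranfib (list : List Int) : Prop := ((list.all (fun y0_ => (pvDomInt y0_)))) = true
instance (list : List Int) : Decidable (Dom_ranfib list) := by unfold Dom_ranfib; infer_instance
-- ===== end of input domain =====

set_option maxRecDepth 40000


-- B builds the set of all Fibonacci numbers up to max(list) once and selects the 2nd/3rd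
-- Fibonacci elements of the list by filter + index, replacing A's per-element Fibonacci
-- regeneration and counter-assignment loop (objective: a different, table-based algorithm).

-- ===== PORT A =====
-- A's 'while t < dato: t=a+b; a=b; b=t' loop; the invariant arguments only justify termination.
def fibLoop (dato a b t : Int) (ha : 0 ≤ a) (hb : 1 ≤ b) (ht : t + 1 ≤ a + b) : Int :=
  if t < dato then fibLoop dato b (a + b) (a + b) (by omega) (by omega) (by omega) else t
termination_by (dato - t).toNat
decreasing_by omega

def fibonacci (dato : Int) : Bool :=
  if dato == 1 then true
  else
    let t := fibLoop dato 0 1 0 (by omega) (by omega) (by omega)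
    t == dato

-- A's 'for i in list' with counter c; fib1/fib2 start unbound (modelled as none).
def ranLoop : List Int → Int → Option Int → Option Int → Option Int × Option Int
  | [], _, f1, f2 => (f1, f2)
  | i :: rest, c, f1, f2 =>
    if fibonacci i then
      if c + 1 == 2 then ranLoop rest (c + 1) (some i) f2
      else if c + 1 == 3 then ranLoop rest (c + 1) f1 (some i)
      else ranLoop rest (c + 1) f1 f2
    else ranLoop rest c f1 f2

-- 'return fib1, fib2': fib1/fib2 still unbound is an UnboundLocalError (excluded by Pre_; getD 0 is a placeholder there).
def ranfib (list : List Int) : Int × Int :=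
  let r := ranLoop list 0 none none
  (r.1.getD 0, r.2.getD 0)

-- ===== PORT B =====
-- B's 'while a <= m: fibs.add(a); a, b = b, a+b'; invariant arguments justify termination.
def fibSetLoop (m a b : Int) (s : PySem.Set Int) (h1 : 1 ≤ a) (h2 : a < b) : PySem.Set Int :=
  if a ≤ m then fibSetLoop m b (a + b) (PySem.Set.add s a) (by omega) (by omega) else s
termination_by (m + 1 - a).toNat
decreasing_by omega

-- 'sel[1], sel[2]' raises IndexError when sel is too short (excluded by Pre_; getD 0 is a placeholder there).
def ranfib_alt (list : List Int) : Int × Int :=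
  let m := PySem.List.maxD list (fun x => x) 0
  let fibs := fibSetLoop m 1 2 (PySem.Set.ofList [0, 1]) (by omega) (by omega)
  let sel := list.filter (fun x => PySem.Set.contains fibs x)
  ((PySem.List.pyGet? sel 1).getD 0, (PySem.List.pyGet? sel 2).getD 0)

-- ===== PRECONDITION & SPEC =====
-- Exact Fibonacci-membership predicate (no size cap): n is a Fibonacci number iff
-- 5n^2+4 or 5n^2-4 is a perfect square; sqrtF is an integer square root (fuel-indexed
-- structural recursion on n, recursing on n/4, so it needs only ~log n steps).
def sqrtF : Nat → Nat → Nat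
  | 0, _ => 0
  | f + 1, n =>
    if n < 2 then n
    else
      let s := 2 * sqrtF f (n / 4)
      if (s + 1) * (s + 1) ≤ n then s + 1 else s

def isSquare (n : Nat) : Bool := sqrtF n n * sqrtF n n == n

def isFib (x : Int) : Bool :=
  decide (0 ≤ x) && (isSquare (5 * x.toNat * x.toNat + 4) || isSquare (5 * x.toNat * x.toNat - 4))

-- Pre_ excludes exactly the inputs with fewer than three Fibonacci elements, on which the
-- Python A raises UnboundLocalError (and B raises IndexError); no input on which A returns is excluded.
def Pre_ranfib (list : List Int) : Prop := 3 ≤ list.countP isFib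
instance (list : List Int) : Decidable (Pre_ranfib list) := by unfold Pre_ranfib; infer_instance

def pvWitness_ranfib : List Int := [4, 1, 1, 2, 9]

def Spec_ranfib (list : List Int) (out : Int × Int) : Prop := out = ranfib_alt list
instance (list : List Int) (out : Int × Int) : Decidable (Spec_ranfib list out) := by unfold Spec_ranfib; infer_instance

-- ===== CLAIM (what is proved, stated in full; the proofs are below) =====
def Claim_equal_ranfib : Prop := ∀ (list : List Int), Dom_ranfib list → Pre_ranfib list → Spec_ranfib list (ranfib list)

-- ===== LEMMAS AND PROOFS =====

-- A's while-loop, entered at a state (fib n, fib (n+1)) with t = b, only ever returns Fibonacci numbers.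
lemma fibLoop_sound : ∀ (M : Nat) (dato a b : Int) (ha : 0 ≤ a) (hb : 1 ≤ b) (ht : b + 1 ≤ a + b)
    (n : Nat), 1 ≤ n → a = (Nat.fib n : Int) → b = (Nat.fib (n + 1) : Int) →
    (dato - b).toNat ≤ M →
    ∃ m, fibLoop dato a b b ha hb ht = (Nat.fib m : Int) := by
  intro M
  induction M with
  | zero =>
    intro dato a b ha hb ht n hn hA hB hM
    rw [fibLoop]
    have : ¬ b < dato := by omega
    simp [this]
    exact ⟨n + 1, hB⟩
  | succ M IH =>
    intro dato a b ha hb ht n hn hA hB hM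
    rw [fibLoop]
    by_cases hc : b < dato
    · simp [hc]
      have hab : a + b = (Nat.fib (n + 2) : Int) := by
        rw [hA, hB, ← Nat.cast_add, ← Nat.fib_add_two]
      exact IH dato b (a + b) (by omega) (by omega) (by omega) (n + 1) (by omega) hB hab (by omega)
    · simp [hc]
      exact ⟨n + 1, hB⟩

-- If dato is a Fibonacci number ahead of the current state, the loop hits it exactly.
lemma fibLoop_complete : ∀ (M : Nat) (dato a b : Int) (ha : 0 ≤ a) (hb : 1 ≤ b) (ht : b + 1 ≤ a + b)
    (n k : Nat), 1 ≤ n → a = (Nat.fib n : Int) → b = (Nat.fib (n + 1) : Int) →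
    b < dato → (Nat.fib k : Int) = dato → (dato - b).toNat ≤ M →
    fibLoop dato a b b ha hb ht = dato := by
  intro M
  induction M with
  | zero => intro dato a b ha hb ht n k hn hA hB hlt hk hM; omega
  | succ M IH =>
    intro dato a b ha hb ht n k hn hA hB hlt hk hM
    rw [fibLoop]
    simp [hlt]
    have hab : a + b = (Nat.fib (n + 2) : Int) := by
      rw [hA, hB, ← Nat.cast_add, ← Nat.fib_add_two]
    by_cases hc : a + b < dato
    · exact IH dato b (a + b) (by omega) (by omega) (by omega) (n + 1) k (by omega) hB hab hc hk (by omega)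
    · rw [fibLoop]
      simp [hc]
      -- dato = fib k with fib (n+1) < dato ≤ fib (n+2), hence dato = fib (n+2) = a + b
      have h1 : Nat.fib (n + 1) < Nat.fib k := by
        have := hB ▸ hlt; exact_mod_cast hk ▸ this
      have h2 : Nat.fib k ≤ Nat.fib (n + 2) := by
        have : dato ≤ a + b := by omega
        exact_mod_cast hk ▸ hab ▸ this
      have hk2 : n + 2 ≤ k := by
        by_contra hko
        have : Nat.fib k ≤ Nat.fib (n + 1) := Nat.fib_mono (by omega)
        omega
      have : Nat.fib (n + 2) ≤ Nat.fib k := Nat.fib_mono hk2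
      have : Nat.fib k = Nat.fib (n + 2) := by omega
      rw [hab, ← hk, this]

-- A's fibonacci test accepts exactly the (nonnegative) Fibonacci numbers.
lemma fibonacci_iff (x : Int) : fibonacci x = true ↔ ∃ k, (Nat.fib k : Int) = x := by
  unfold fibonacci
  by_cases h1 : x = 1
  · subst h1; simp
    exact ⟨1, by norm_num⟩
  · simp [h1]
    rw [fibLoop]
    by_cases hp : (0 : Int) < x
    · have h2 : 2 ≤ x := by omega
      simp [hp]
      constructor
      · intro hres
        obtain ⟨m, hm⟩ := fibLoop_sound (x - 1).toNat x 1 1 (by omega) (by omega) (by omega)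
          1 (by omega) (by norm_num) (by norm_num) (by omega)
        exact ⟨m, by rw [← hm]; exact hres⟩
      · rintro ⟨k, hk⟩
        exact fibLoop_complete (x - 1).toNat x 1 1 (by omega) (by omega) (by omega)
          1 k (by omega) (by norm_num) (by norm_num) (by omega) hk (by omega)
    · simp [hp]
      constructor
      · intro h0
        exact ⟨0, by simp [← h0]⟩
      · rintro ⟨k, hk⟩
        have : (0 : Int) ≤ (Nat.fib k : Int) := by positivity
        omega

-- Membership in B's set loop, entered at (fib n, fib (n+1)) with n ≥ 2.
lemma fibSetLoop_mem : ∀ (M : Nat) (m a b : Int) (h1 : 1 ≤ a) (h2 : a < b) (s : PySem.Set Int)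
    (n : Nat), 2 ≤ n → a = (Nat.fib n : Int) → b = (Nat.fib (n + 1) : Int) →
    (m + 1 - a).toNat ≤ M → ∀ x : Int,
    (x ∈ fibSetLoop m a b s h1 h2 ↔ x ∈ s ∨ ∃ k, n ≤ k ∧ (Nat.fib k : Int) ≤ m ∧ x = (Nat.fib k : Int)) := by
  intro M
  induction M with
  | zero =>
    intro m a b h1 h2 s n hn hA hB hM x
    rw [fibSetLoop]
    have hna : ¬ a ≤ m := by omega
    simp [hna]
    rintro k hk hfib rfl
    have : Nat.fib n ≤ Nat.fib k := Nat.fib_mono hk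
    omega
  | succ M IH =>
    intro m a b h1 h2 s n hn hA hB hM x
    rw [fibSetLoop]
    by_cases hc : a ≤ m
    · simp only [hc, if_true]
      have hab : a + b = (Nat.fib (n + 2) : Int) := by
        rw [hA, hB, ← Nat.cast_add, ← Nat.fib_add_two]
      have hmeas : (m + 1 - b).toNat ≤ M := by omega
      rw [IH m b (a + b) (by omega) (by omega) _ (n + 1) (by omega) hB hab hmeas x]
      rw [PySem.Set.mem_add]
      constructor
      · rintro ((hs | hxa) | ⟨k, hk, hfib, rfl⟩)
        · exact Or.inl hs
        · exact Or.inr ⟨n, le_refl n, by omega, by omega⟩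
        · exact Or.inr ⟨k, by omega, hfib, rfl⟩
      · rintro (hs | ⟨k, hk, hfib, rfl⟩)
        · exact Or.inl (Or.inl hs)
        · rcases Nat.eq_or_lt_of_le hk with heq | hlt
          · exact Or.inl (Or.inr (by subst heq; omega))
          · exact Or.inr ⟨k, by omega, hfib, rfl⟩
    · simp [hc]
      rintro k hk hfib rfl
      have : Nat.fib n ≤ Nat.fib k := Nat.fib_mono hk
      omega

-- For x ≤ m, A's fibonacci test agrees with membership in B's precomputed set.
lemma fibonacci_eq_contains (m x : Int) (hx : x ≤ m) :
    fibonacci x = PySem.Set.contains (fibSetLoop m 1 2 (PySem.Set.ofList [0, 1]) (by omega) (by omega)) x := by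
  have hset := fibSetLoop_mem (m + 1 - 1).toNat m 1 2 (by omega) (by omega)
    (PySem.Set.ofList [0, 1]) 2 (by omega) (by norm_num) (by norm_num) (by omega) x
  rw [Bool.eq_iff_iff, fibonacci_iff, PySem.Set.contains_iff, hset, PySem.Set.mem_ofList]
  constructor
  · rintro ⟨k, rfl⟩
    by_cases h01 : (Nat.fib k : Int) = 0 ∨ (Nat.fib k : Int) = 1
    · exact Or.inl (by rcases h01 with h | h <;> simp [h])
    · push Not at h01
      refine Or.inr ⟨k, ?_, hx, rfl⟩
      by_contra hko
      interval_cases k <;> simp_all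
  · rintro (hmem | ⟨k, hk, hfib, rfl⟩)
    · simp only [List.mem_cons] at hmem
      rcases hmem with h | h | h
      · exact ⟨0, by simp [h]⟩
      · exact ⟨1, by norm_num [h]⟩
      · simp at h
    · exact ⟨k, rfl⟩

-- A's counter loop computes the 2nd and 3rd filtered elements.
lemma ranLoop_spec : ∀ (l : List Int) (c : Int) (f1 f2 : Option Int), 0 ≤ c →
    ranLoop l c f1 f2 =
      ((if 2 ≤ c then f1 else ((l.filter (fun i => fibonacci i))[(1 - c).toNat]?).or f1),
       (if 3 ≤ c then f2 else ((l.filter (fun i => fibonacci i))[(2 - c).toNat]?).or f2)) := by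
  intro l
  induction l with
  | nil =>
    intro c f1 f2 hc
    simp only [ranLoop, List.filter_nil, List.getElem?_nil, Option.none_or, ite_self]
  | cons i rest IH =>
    intro c f1 f2 hc
    simp only [ranLoop]
    by_cases hf : fibonacci i = true
    · have hfil : List.filter (fun i => fibonacci i) (i :: rest)
          = i :: List.filter (fun i => fibonacci i) rest := by simp [hf]
      rw [hfil]
      rcases (by omega : c = 0 ∨ c = 1 ∨ c = 2 ∨ 3 ≤ c) with rfl | rfl | rfl | h3
      · rw [if_pos hf, if_neg (show ¬(((0:Int) + 1 == 2) = true) by decide),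
          if_neg (show ¬(((0:Int) + 1 == 3) = true) by decide)]
        norm_num
        rw [IH 1 f1 f2 (by omega)]
        norm_num [show Int.toNat 2 = 2 from rfl, show ∀ (x : Int) (l : List Int), (x :: l)[2]? = l[1]? from fun _ _ => rfl, List.getElem?_cons_succ, List.getElem?_cons_zero]
      · rw [if_pos hf, if_pos (show (((1:Int) + 1 == 2) = true) by decide)]
        norm_num
        rw [IH 2 (some i) f2 (by omega)]
        norm_num [show Int.toNat 2 = 2 from rfl, show ∀ (x : Int) (l : List Int), (x :: l)[2]? = l[1]? from fun _ _ => rfl, List.getElem?_cons_succ, List.getElem?_cons_zero]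
      · rw [if_pos hf, if_neg (show ¬(((2:Int) + 1 == 2) = true) by decide),
          if_pos (show (((2:Int) + 1 == 3) = true) by decide)]
        norm_num
        rw [IH 3 f1 (some i) (by omega)]
        norm_num [show Int.toNat 2 = 2 from rfl, show ∀ (x : Int) (l : List Int), (x :: l)[2]? = l[1]? from fun _ _ => rfl, List.getElem?_cons_succ, List.getElem?_cons_zero]
      · rw [if_pos hf,
          if_neg (show ¬((c + 1 == 2) = true) by simp [beq_iff_eq]; omega),
          if_neg (show ¬((c + 1 == 3) = true) by simp [beq_iff_eq]; omega)]
        rw [IH (c + 1) f1 f2 (by omega)]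
        simp [show (2:Int) ≤ c + 1 by omega, show (3:Int) ≤ c + 1 by omega,
          show (2:Int) ≤ c by omega, show (3:Int) ≤ c by omega]
    · simp only [hf, if_false, Bool.false_eq_true]
      have hfil : List.filter (fun i => fibonacci i) (i :: rest)
          = List.filter (fun i => fibonacci i) rest := by simp [hf]
      rw [hfil, IH c f1 f2 hc]

-- Every element of the list is bounded by B's max(list, default=0).
lemma le_maxD (list : List Int) : ∀ x ∈ list, x ≤ PySem.List.maxD list (fun x => x) 0 := by
  intro x hx
  rcases hm : PySem.List.max? list (fun x : Int => x) with _ | mx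
  · rw [PySem.List.max?_eq_none_iff] at hm
    subst hm; simp at hx
  · have := PySem.List.max?_isMax hm x hx
    simpa [PySem.List.maxD, hm] using this

-- ===== VERDICT (by name: the statement is the Claim_ definition above) =====
theorem ranfib_spec : Claim_equal_ranfib := by
  intro list hdom hpre
  unfold Spec_ranfib ranfib ranfib_alt
  have hfil : list.filter (fun x => PySem.Set.contains
        (fibSetLoop (PySem.List.maxD list (fun x => x) 0) 1 2 (PySem.Set.ofList [0, 1])
          (by omega) (by omega)) x)
      = list.filter (fun i => fibonacci i) := by
    refine List.filter_congr ?_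
    intro x hx
    exact (fibonacci_eq_contains _ x (le_maxD list x hx)).symm
  rw [ranLoop_spec list 0 none none (by omega)]
  simp only [hfil]
  rw [show (1:Int) = ((1:Nat):Int) by norm_num, show (2:Int) = ((2:Nat):Int) by norm_num]
  rw [PySem.List.pyGet?_natCast, PySem.List.pyGet?_natCast]
  norm_num [show Int.toNat 2 = 2 from rfl]
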